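-- pv_equiv track=rewrite | github.com/lixiang2017/leetcode | leetcode-cn/CrackingTheCodingInterview/16.20.0_T9_LCCI.py | getValidT9Words
-- ===== SOURCE A (Python) =====
-- from typing import List
--
-- def getValidT9Words(num: str, words: List[str]) -> List[str]:
--     # key = [2, 2, 2, 3, 3, 3, 4, 4, 4, 5, 5, 5, 6, 6, 6,
--     # 7, 7, 7, 7, 8, 8, 8, 9, 9, 9, 9]
--     key = ['2', '2', '2', '3', '3', '3', '4', '4', '4', '5', '5', '5',
--      '6', '6', '6', '7', '7', '7', '7', '8', '8', '8', '9', '9', '9', '9']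
--     ans = []
--     for w in words:
--         dec = ''.join([key[ord(ch) - ord('a')] for ch in w])
--         if dec == num:
--             ans.append(w)
--     return ans
-- ===== SOURCE B (Python) =====
-- from typing import List
--
-- def getValidT9Words(num: str, words: List[str]) -> List[str]:
--     digit = dict(zip('abcdefghijklmnopqrstuvwxyz', '22233344455566677778889999'))
--     buckets = {}
--     for w in words:
--         buckets.setdefault(''.join(digit[ch] for ch in w), []).append(w)
--     return buckets.get(num, [])
-- ===== Notes on version B (the rewrite author's own statement) =====
-- stated objective: alternative
-- what changed: B groups the words into buckets keyed by their T9-decoded digit string in one setdefault/append pass and answers with a single dict lookup, instead of A's per-word decode-compare-append filter; Pre_ excludes words with any non-lowercase character, where A either raises IndexError (codes outside 71..122) or returns a value that is an artefact of Python's negative list indexing (codes 71..96), and where B raises KeyError.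
-- outside the precondition, e.g. on getValidT9Words('2', ['G']): A returns ['G'], B raises KeyError; on getValidT9Words('2', ['F']): A raises IndexError, B raises KeyError
import Mathlib
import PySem

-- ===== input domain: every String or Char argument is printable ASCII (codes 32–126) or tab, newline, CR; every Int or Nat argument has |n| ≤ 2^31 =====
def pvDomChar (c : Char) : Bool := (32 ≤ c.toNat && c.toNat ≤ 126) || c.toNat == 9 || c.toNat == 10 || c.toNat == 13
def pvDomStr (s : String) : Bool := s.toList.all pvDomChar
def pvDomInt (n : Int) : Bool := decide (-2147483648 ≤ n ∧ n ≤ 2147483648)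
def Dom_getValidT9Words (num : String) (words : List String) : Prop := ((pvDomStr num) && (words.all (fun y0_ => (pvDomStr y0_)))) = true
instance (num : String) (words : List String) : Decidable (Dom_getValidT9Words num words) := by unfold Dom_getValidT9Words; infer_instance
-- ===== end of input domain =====

-- B groups the words into a dict keyed by their decoded digit string and answers
-- with a single lookup, instead of A's per-word compare-and-append filter;
-- objective: alternative structure, same cost.

-- ===== PORT A =====
def pvKeyA : List String := ["2", "2", "2", "3", "3", "3", "4", "4", "4", "5", "5", "5",
  "6", "6", "6", "7", "7", "7", "7", "8", "8", "8", "9", "9", "9", "9"]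

-- dec = ''.join([key[ord(ch) - ord('a')] for ch in w]); pyGet? = Python list indexing
-- (negative indices wrap; the getD "" arm is never reached inside Pre_, where every index is in range)
def pvDecodeA (w : String) : String :=
  PySem.Str.join "" (w.toList.map (fun ch => (PySem.List.pyGet? pvKeyA ((ch.toNat : Int) - 97)).getD ""))

def getValidT9Words (num : String) (words : List String) : List String :=
  words.foldl (fun ans w => if pvDecodeA w == num then ans ++ [w] else ans) []

-- ===== PORT B =====
-- digit = dict(zip('abcdefghijklmnopqrstuvwxyz', '22233344455566677778889999'))
-- (each 1-character Python string is modelled as its Char)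
def pvDigitMapB : PySem.Dict Char Char :=
  (List.zip "abcdefghijklmnopqrstuvwxyz".toList "22233344455566677778889999".toList).foldl
    (fun d p => PySem.Dict.insert d p.1 p.2) PySem.Dict.empty

-- ''.join(digit[ch] for ch in w); digit[ch] raises KeyError outside Pre_ (get? = none there;
-- the getD ' ' arm is never reached inside Pre_)
def pvDecodeB (w : String) : String :=
  String.ofList (w.toList.map (fun ch => (PySem.Dict.get? pvDigitMapB ch).getD ' '))

def getValidT9Words_alt (num : String) (words : List String) : List String :=
  PySem.Dict.getD
    (words.foldl (fun b w => PySem.Dict.modify b (pvDecodeB w) [] (fun l => l ++ [w]))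
      PySem.Dict.empty)
    num []

-- ===== PRECONDITION & SPEC =====
-- Pre_ excludes words with any non-lowercase character: there A either raises IndexError
-- (character codes outside 71..122) or returns a value that is an artefact of Python's
-- negative list indexing (codes 71..96, 'G'..'`'), and B's dict lookup raises KeyError.
def Pre_getValidT9Words (num : String) (words : List String) : Prop :=
  (words.all (fun w => w.toList.all (fun ch => 97 ≤ ch.toNat && ch.toNat ≤ 122))) = true
instance (num : String) (words : List String) : Decidable (Pre_getValidT9Words num words) := by
  unfold Pre_getValidT9Words; infer_instance

def pvWitness_getValidT9Words : String × List String := ("22", ["aa", "ab", "ba", "a"])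

def Spec_getValidT9Words (num : String) (words : List String) (out : List String) : Prop :=
  out = getValidT9Words_alt num words
instance (num : String) (words : List String) (out : List String) :
    Decidable (Spec_getValidT9Words num words out) := by unfold Spec_getValidT9Words; infer_instance

-- ===== CLAIM (what is proved, stated in full; the proofs are below) =====
def Claim_equal_getValidT9Words : Prop := ∀ (num : String) (words : List String),
  Dom_getValidT9Words num words → Pre_getValidT9Words num words →
  Spec_getValidT9Words num words (getValidT9Words num words)

-- ===== LEMMAS AND PROOFS =====

-- the character B's digit dict produces for a character (proof-side helper)
def pvDigit (ch : Char) : Char := (PySem.Dict.get? pvDigitMapB ch).getD ' '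

set_option maxRecDepth 4096 in
theorem pv_perchar : ∀ n : Nat, n < 26 →
    ((PySem.List.pyGet? pvKeyA (((97 + n : Nat) : Int) - 97)).getD "").toList
      = [pvDigit (Char.ofNat (97 + n))] := by
  decide

theorem pv_decodeA_toList (w : String)
    (h : ∀ ch ∈ w.toList, 97 ≤ ch.toNat ∧ ch.toNat ≤ 122) :
    (pvDecodeA w).toList = w.toList.map pvDigit := by
  unfold pvDecodeA
  rw [PySem.Str.toList_join]
  have hmap : (w.toList.map (fun ch => (PySem.List.pyGet? pvKeyA ((ch.toNat : Int) - 97)).getD "")).map String.toList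
      = (w.toList.map pvDigit).map (fun c => [c]) := by
    rw [List.map_map, List.map_map]
    apply List.map_congr_left
    intro ch hch
    have hb := h ch hch
    have := pv_perchar (ch.toNat - 97) (by omega)
    rw [show 97 + (ch.toNat - 97) = ch.toNat by omega, Char.ofNat_toNat] at this
    simpa using this
  rw [hmap]
  simpa using PySem.Chars.join_nil_singletons (w.toList.map pvDigit)

theorem pv_decodeB_toList (w : String) : (pvDecodeB w).toList = w.toList.map pvDigit := by
  unfold pvDecodeB
  simp [pvDigit]

theorem pv_decode_eq (w : String)
    (h : ∀ ch ∈ w.toList, 97 ≤ ch.toNat ∧ ch.toNat ≤ 122) : pvDecodeA w = pvDecodeB w := by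
  rw [← String.toList_inj, pv_decodeA_toList w h, pv_decodeB_toList]

theorem pv_alt_eq_filter (num : String) (words : List String) :
    getValidT9Words_alt num words = words.filter (fun w => pvDecodeB w == num) := by
  unfold getValidT9Words_alt
  have hfm : words.foldl (fun b w => PySem.Dict.modify b (pvDecodeB w) [] (fun l => l ++ [w]))
        PySem.Dict.empty
      = (words.map (fun w => (pvDecodeB w, w))).foldl
          (fun b p => PySem.Dict.modify b p.1 [] (fun l => l ++ [p.2])) PySem.Dict.empty := by
    rw [List.foldl_map]
  rw [hfm, PySem.Dict.getD_foldl_modify_append,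
    PySem.Dict.getD_empty, List.filter_map, List.map_map]
  simp [Function.comp_def]

-- ===== VERDICT (by name: the statement is the Claim_ definition above) =====
theorem getValidT9Words_spec : Claim_equal_getValidT9Words := by
  intro num words _hdom hpre
  unfold Spec_getValidT9Words getValidT9Words
  rw [PySem.List.foldl_append_if_eq_filter, pv_alt_eq_filter]
  simp only [List.nil_append]
  apply List.filter_congr
  intro w hw
  unfold Pre_getValidT9Words at hpre
  rw [List.all_eq_true] at hpre
  have hchars : ∀ ch ∈ w.toList, 97 ≤ ch.toNat ∧ ch.toNat ≤ 122 := by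
    intro ch hch
    have := hpre w hw
    rw [List.all_eq_true] at this
    have := this ch hch
    simp only [Bool.and_eq_true, decide_eq_true_eq] at this
    exact this
  rw [pv_decode_eq w hchars]
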